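-- pv_equiv track=rewrite | github.com/kaleidoscopeAI/goeckoh-site | project/echo_companion/JacksonCompanion/echo_core.py | _first_person_projector
-- ===== SOURCE A (Python) =====
-- def _first_person_projector(text):
--     """
--     Projects a second-person ("you") string to a first-person ("I") string.
--     Includes simple verb corrections.
--     """
--     tokens = text.split(" ")
--     result = []
--     i = 0
--     while i < len(tokens):
--         cur = tokens[i]
--         nxt = tokens[i+1] if i+1 < len(tokens) else None
--
--         if cur.lower() == "you" and nxt and nxt.lower() == "are":
--             result.append("I")
--             result.append("am")
--             i += 2
--             continue
--
--         if cur.lower() == "your":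
--             result.append("my")
--             i += 1
--             continue
--
--         if cur.lower() == "you":
--             result.append("I")
--             i += 1
--             continue
--
--         # Verb correction after "I"
--         if len(result) > 0 and result[-1] == "I":
--             # If verb is 3rd person singular like "runs", "wants"
--             # This is a simplification. A proper check would involve a POS tagger.
--             if cur.endswith("s") and len(cur) > 2 and not cur.endswith("ss"):
--                 cur = cur[:-1]
--
--         result.append(cur)
--         i += 1
--     return " ".join(result)
-- ===== SOURCE B (Python) =====
-- def _first_person_projector(text):
--     """Two-pass rewrite: pronoun substitution first, then verb fix-up."""
--     tokens = text.split(" ")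
--     # Pass 1: pronoun substitution with one-token lookahead.
--     subs = []
--     i = 0
--     while i < len(tokens):
--         t = tokens[i]
--         low = t.lower()
--         if low == "you" and i + 1 < len(tokens) and tokens[i + 1].lower() == "are":
--             subs.append("I")
--             subs.append("am")
--             i += 2
--         elif low == "your":
--             subs.append("my")
--             i += 1
--         elif low == "you":
--             subs.append("I")
--             i += 1
--         else:
--             subs.append(t)
--             i += 1
--     # Pass 2: drop a 3rd-person 's' from the token right after an "I".
--     out = []
--     prev = ""
--     for t in subs:
--         if prev == "I" and t.endswith("s") and len(t) > 2 and not t.endswith("ss"):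
--             out.append(t[:-1])
--         else:
--             out.append(t)
--         prev = t
--     return " ".join(out)
-- ===== Notes on version B (the rewrite author's own statement) =====
-- stated objective: alternative
-- what changed: Single interleaved loop keyed on result[-1] is split into two passes: a lookahead pronoun-substitution pass producing a token list, then a previous-token scan that drops the third-person suffix right after an emitted first-person pronoun (valid because a corrected verb can never equal that pronoun).
import Mathlib
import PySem

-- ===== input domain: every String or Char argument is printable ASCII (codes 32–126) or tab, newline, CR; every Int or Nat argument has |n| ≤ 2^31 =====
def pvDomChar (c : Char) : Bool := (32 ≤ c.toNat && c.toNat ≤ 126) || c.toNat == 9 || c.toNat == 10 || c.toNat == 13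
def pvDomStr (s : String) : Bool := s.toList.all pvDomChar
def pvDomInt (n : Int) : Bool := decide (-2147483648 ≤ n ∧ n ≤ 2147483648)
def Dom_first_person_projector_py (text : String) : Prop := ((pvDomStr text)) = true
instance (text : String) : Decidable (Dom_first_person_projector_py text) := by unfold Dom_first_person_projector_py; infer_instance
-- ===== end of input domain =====

-- B splits A's single loop into a pronoun-substitution pass and a verb-fixing pass (alternative decomposition, same cost).

-- ===== PORT A =====
-- the verb correction guarded by result[-1] == "I" (racc is result reversed)
def fpVerbFix (racc : List String) (cur : String) : String :=
  if (racc.head? == some "I") && PySem.Str.endswith cur "s" &&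
     decide (2 < PySem.Str.len cur) && !(PySem.Str.endswith cur "ss")
  then PySem.Str.slice cur none (some (-1)) else cur

-- A's while loop; racc accumulates `result` in reverse
def fpLoopA : List String → List String → List String
  | racc, [] => racc
  | racc, cur :: rest =>
    if (PySem.Str.lower cur == "you") &&
       (match rest.head? with
        | some nxt => (nxt != "") && (PySem.Str.lower nxt == "are")
        | none => false) then
      fpLoopA ("am" :: "I" :: racc) (rest.drop 1)
    else if PySem.Str.lower cur == "your" then fpLoopA ("my" :: racc) rest
    else if PySem.Str.lower cur == "you" then fpLoopA ("I" :: racc) rest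
    else fpLoopA (fpVerbFix racc cur :: racc) rest
termination_by _ toks => toks.length
decreasing_by all_goals simp

def first_person_projector_py (text : String) : String :=
  PySem.Str.join " " ((fpLoopA [] ((PySem.Str.split? text " ").getD [])).reverse)

-- ===== PORT B =====
-- pass 1: pronoun substitution with one-token lookahead
def fpSub : List String → List String
  | [] => []
  | t :: rest =>
    if (PySem.Str.lower t == "you") &&
       (match rest.head? with
        | some nxt => PySem.Str.lower nxt == "are"
        | none => false) then
      "I" :: "am" :: fpSub (rest.drop 1)
    else if PySem.Str.lower t == "your" then "my" :: fpSub rest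
    else if PySem.Str.lower t == "you" then "I" :: fpSub rest
    else t :: fpSub rest
termination_by toks => toks.length
decreasing_by all_goals simp

-- pass 2 body: drop the 3rd-person 's' right after an "I"
def fpCorr (prev t : String) : String :=
  if (prev == "I") && PySem.Str.endswith t "s" &&
     decide (2 < PySem.Str.len t) && !(PySem.Str.endswith t "ss")
  then PySem.Str.slice t none (some (-1)) else t

def fpFix (prev : String) : List String → List String
  | [] => []
  | t :: rest => fpCorr prev t :: fpFix t rest

def first_person_projector_py_alt (text : String) : String :=
  PySem.Str.join " " (fpFix "" (fpSub ((PySem.Str.split? text " ").getD [])))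

-- ===== PRECONDITION & SPEC =====
def Spec_first_person_projector_py (text : String) (out : String) : Prop := out = first_person_projector_py_alt text
instance (text : String) (out : String) : Decidable (Spec_first_person_projector_py text out) := by unfold Spec_first_person_projector_py; infer_instance

-- ===== CLAIM (what is proved, stated in full; the proofs are below) =====
def Claim_equal_first_person_projector_py : Prop := ∀ (text : String), Dom_first_person_projector_py text → Spec_first_person_projector_py text (first_person_projector_py text)

-- ===== LEMMAS AND PROOFS =====

lemma fp_key : ∀ (n : ℕ) (toks : List String), toks.length ≤ n →
    ∀ (racc : List String) (prev : String),
    ((racc.head? = some "I") ↔ (prev = "I")) →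
    fpLoopA racc toks = (fpFix prev (fpSub toks)).reverse ++ racc := by
  intro n
  induction n with
  | zero =>
    intro toks h racc prev _
    have : toks = [] := List.eq_nil_of_length_eq_zero (Nat.le_zero.mp h)
    subst this
    simp [fpLoopA, fpSub, fpFix]
  | succ n ih =>
    intro toks h racc prev hpr
    match toks with
    | [] => simp [fpLoopA, fpSub, fpFix]
    | cur :: rest =>
      have hlen : rest.length ≤ n := by simpa using h
      have hc : (match rest.head? with
                  | some nxt => (nxt != "") && (PySem.Str.lower nxt == "are")
                  | none => false)
              = (match rest.head? with
                  | some nxt => (PySem.Str.lower nxt == "are")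
                  | none => false) := by
        cases rest with
        | nil => rfl
        | cons nxt r =>
          by_cases he : nxt = ""
          · subst he
            simp [show (PySem.Str.lower "" == "are") = false from by decide]
          · simp [he]
      simp only [fpLoopA, fpSub, hc]
      split_ifs with h1 h2 h3
      · -- "you are" branch
        rw [ih (rest.drop 1) (le_trans (by simp) hlen) ("am" :: "I" :: racc) "am" (by simp)]
        simp [fpFix, fpCorr]
      · -- "your" branch
        rw [ih rest hlen ("my" :: racc) "my" (by simp)]
        simp [fpFix, fpCorr]
      · -- "you" branch
        rw [ih rest hlen ("I" :: racc) "I" (by simp)]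
        simp [fpFix, fpCorr]
      · -- verb-correction branch
        have hb : (racc.head? == some "I") = (prev == "I") := by
          by_cases hp : prev = "I"
          · simp [hp, hpr.mpr hp]
          · have hne : racc.head? ≠ some "I" := fun hh => hp (hpr.mp hh)
            simp [hp, hne]
        have hfix : fpVerbFix racc cur = fpCorr prev cur := by
          simp only [fpVerbFix, fpCorr, hb]
        have hiff : ((fpCorr prev cur) = "I") ↔ (cur = "I") := by
          unfold fpCorr
          split_ifs with hc2
          · constructor
            · intro hsl
              exfalso
              have h2lt : 2 < PySem.Str.len cur := by
                have := hc2
                simp only [Bool.and_eq_true, decide_eq_true_eq] at this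
                exact this.1.2
              have htl := congrArg String.toList hsl
              rw [PySem.Str.slice_to_neg_one] at htl
              have hlen1 : cur.toList.length - 1 = 1 := by
                have := congrArg List.length htl
                simpa using this
              have : (PySem.Str.len cur) = (cur.toList.length : Int) := by
                simp [PySem.Str.len_eq]
              omega
            · intro hcur
              exfalso
              subst hcur
              simp only [Bool.and_eq_true] at hc2
              have := hc2.1.1.2
              exact absurd this (by decide)
          · exact Iff.rfl
        rw [hfix, ih rest hlen (fpCorr prev cur :: racc) cur (by simpa using hiff)]
        simp [fpFix]

-- ===== VERDICT (by name: the statement is the Claim_ definition above) =====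
theorem first_person_projector_py_spec : Claim_equal_first_person_projector_py := by
  intro text _
  unfold Spec_first_person_projector_py first_person_projector_py first_person_projector_py_alt
  rw [fp_key ((PySem.Str.split? text " ").getD []).length _ le_rfl [] "" (by simp)]
  simp
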